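-- pv_equiv track=rewrite | github.com/112224/algorithm | python3/1307 마방진.py | four_even
-- ===== SOURCE A (Python) =====
-- def four_even(n):
--     board = [[0] * n for _ in range(n)]
--     cnt = n*n
--     st = []
--     l, h = n//4, n - n//4
--     for i in range(n):
--         c1 = l <= i < h
--         for j in range(n):
--             c2 = l <= j < h
--             if c1 ^ c2:
--                 board[i][j] = cnt
--             else:
--                 st.append(cnt)
--             cnt -= 1
--     for i in range(n):
--         for j in range(n):
--             if board[i][j] == 0:
--                 board[i][j] = st.pop()
--     return board
-- ===== SOURCE B (Python) =====
-- def four_even(n):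
--     l = n // 4
--     h = n - l
--     return [[n*n - (i*n + j) if (l <= i < h) != (l <= j < h) else i*n + j + 1
--              for j in range(n)]
--             for i in range(n)]
-- ===== Notes on version B (the rewrite author's own statement) =====
-- stated objective: simpler
-- what changed: The stack and the whole second fill pass are removed: each cell's value is computed directly by a closed-form per-cell expression (the complement count on band-xor cells, the running index elsewhere), valid because the non-xor cell set is centrally symmetric.
import Mathlib
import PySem

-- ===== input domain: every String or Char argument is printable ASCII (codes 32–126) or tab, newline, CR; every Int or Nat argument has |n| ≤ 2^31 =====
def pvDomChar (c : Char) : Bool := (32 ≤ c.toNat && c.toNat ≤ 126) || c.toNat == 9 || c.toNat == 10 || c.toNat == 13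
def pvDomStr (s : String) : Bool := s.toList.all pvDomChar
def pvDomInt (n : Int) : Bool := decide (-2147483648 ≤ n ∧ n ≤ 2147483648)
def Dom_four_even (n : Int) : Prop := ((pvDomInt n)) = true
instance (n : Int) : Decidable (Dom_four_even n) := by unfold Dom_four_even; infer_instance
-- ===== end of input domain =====

-- B removes A's stack and second fill pass: each cell is a closed-form expression (objective: simpler).

-- ===== PORT A =====
-- board[i][j] = v  (indices are always in range when A runs; getD defaults are never used)
def pvSet2 (b : List (List Int)) (i j : Nat) (v : Int) : List (List Int) :=
  b.set i ((b.getD i []).set j v)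

def four_even (n : Int) : List (List Int) :=
  -- [[0]*n for _ in range(n)]  ([0]*n = replicate n.toNat 0, exact also for n ≤ 0)
  let board := (PySem.List.pyRange 0 n 1).map (fun _ => List.replicate n.toNat (0 : Int))
  let l := PySem.Int.floordiv n 4
  let h := n - l
  -- first double loop: state (board, cnt, st); st.append = ++ [·]
  let p1 := (PySem.List.pyRange 0 n 1).foldl (fun s i =>
      let c1 := decide (l ≤ i ∧ i < h)
      (PySem.List.pyRange 0 n 1).foldl (fun (s : List (List Int) × Int × List Int) j =>
        let c2 := decide (l ≤ j ∧ j < h)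
        if c1 != c2 then (pvSet2 s.1 i.toNat j.toNat s.2.1, s.2.1 - 1, s.2.2)
        else (s.1, s.2.1 - 1, s.2.2 ++ [s.2.1])) s)
    (board, (n * n, ([] : List Int)))
  -- second double loop: st.pop() = (getLast, dropLast); the stack is never empty when popped
  let p2 := (PySem.List.pyRange 0 n 1).foldl (fun s i =>
      (PySem.List.pyRange 0 n 1).foldl (fun (s : List (List Int) × List Int) j =>
        if (s.1.getD i.toNat []).getD j.toNat 0 == 0 then
          (pvSet2 s.1 i.toNat j.toNat (s.2.getLast?.getD 0), s.2.dropLast)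
        else s) s)
    (p1.1, p1.2.2)
  p2.1

-- ===== PORT B =====
def four_even_alt (n : Int) : List (List Int) :=
  let l := PySem.Int.floordiv n 4
  let h := n - l
  (PySem.List.pyRange 0 n 1).map (fun i =>
    (PySem.List.pyRange 0 n 1).map (fun j =>
      if (decide (l ≤ i ∧ i < h)) != (decide (l ≤ j ∧ j < h)) then n * n - (i * n + j)
      else i * n + j + 1))

-- ===== PRECONDITION & SPEC =====
def Spec_four_even (n : Int) (out : List (List Int)) : Prop := out = four_even_alt n
instance (n : Int) (out : List (List Int)) : Decidable (Spec_four_even n out) := by unfold Spec_four_even; infer_instance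

-- ===== CLAIM (what is proved, stated in full; the proofs are below) =====
def Claim_equal_four_even : Prop := ∀ (n : Int), Dom_four_even n → Spec_four_even n (four_even n)

-- ===== LEMMAS AND PROOFS =====

-- Nat-level vocabulary
def bandN (N i : Nat) : Bool := decide (N / 4 ≤ i ∧ i < N - N / 4)
def qN (N i j : Nat) : Bool := bandN N i != bandN N j
-- pass-1 cell value, final cell value (as Int)
def cellA (N i j : Nat) : Int := if qN N i j then (N : Int) * N - (i * N + j) else 0
def cellF (N i j : Nat) : Int := if qN N i j then (N : Int) * N - (i * N + j) else (i * N + j : Nat) + 1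
def rowA (N i : Nat) : List Int := (List.range N).map (cellA N i)
def rowF (N i : Nat) : List Int := (List.range N).map (cellF N i)
-- flattened indices of the "else" cells of row i, from column k on
def rowIdxFrom (N i k : Nat) : List Nat :=
  ((List.range' k (N - k)).filter (fun j => !(qN N i j))).map (fun j => i * N + j)
def rowIdx (N i : Nat) : List Nat := rowIdxFrom N i 0

-- partial states
def rowP1 (N i k : Nat) : List Int := (List.range N).map (fun j => if j < k then cellA N i j else 0)
def bd1 (N i k : Nat) : List (List Int) :=
  (List.range N).map (fun i' => if i' < i then rowA N i' else if i' = i then rowP1 N i k else List.replicate N 0)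
def rowP2 (N i k : Nat) : List Int := (List.range N).map (fun j => if j < k then cellF N i j else cellA N i j)
def bd2 (N i k : Nat) : List (List Int) :=
  (List.range N).map (fun i' => if i' < i then rowF N i' else if i' = i then rowP2 N i k else rowA N i')
def bdRows (N k : Nat) : List (List Int) :=
  (List.range N).map (fun i' => if i' < k then rowA N i' else List.replicate N 0)
def bdF (N k : Nat) : List (List Int) :=
  (List.range N).map (fun i' => if i' < k then rowF N i' else rowA N i')
-- tail of the stack source: else-cells from (i,k) on, in traversal order
def tailIdx (N i k : Nat) : List Nat :=
  rowIdxFrom N i k ++ (List.range' (i + 1) (N - (i + 1))).flatMap (rowIdx N)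
-- the stack contents at position (i,k) of pass 2
def stk (N i k : Nat) : List Int := ((tailIdx N i k).map (fun t : Nat => (t : Int) + 1)).reverse

-- Nat-level step functions (images of the port's loop bodies under the cast range)
def step1 (N i : Nat) (s : List (List Int) × Int × List Int) (j : Nat) : List (List Int) × Int × List Int :=
  if bandN N i != bandN N j then (pvSet2 s.1 i j s.2.1, s.2.1 - 1, s.2.2)
  else (s.1, s.2.1 - 1, s.2.2 ++ [s.2.1])
def step2 (N i : Nat) (s : List (List Int) × List Int) (j : Nat) : List (List Int) × List Int :=
  if (s.1.getD i []).getD j 0 == 0 then (pvSet2 s.1 i j (s.2.getLast?.getD 0), s.2.dropLast) else s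

theorem band_cast (N i : Nat) :
    decide ((PySem.Int.floordiv (N : Int) 4) ≤ (i : Int) ∧ (i : Int) < (N : Int) - PySem.Int.floordiv (N : Int) 4)
      = bandN N i := by
  have h4 : PySem.Int.floordiv (N : Int) 4 = ((N / 4 : Nat) : Int) := by
    exact_mod_cast PySem.Int.floordiv_natCast N 4
  simp only [bandN, h4, decide_eq_decide]
  omega

theorem band_sym (N i : Nat) (h : i < N) : bandN N (N - 1 - i) = bandN N i := by
  simp only [bandN, decide_eq_decide]
  omega

theorem q_sym_left (N i j : Nat) (h : i < N) : qN N (N - 1 - i) j = qN N i j := by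
  simp [qN, band_sym N i h]

theorem q_sym_right (N i j : Nat) (h : j < N) : qN N i (N - 1 - j) = qN N i j := by
  simp [qN, band_sym N j h]

theorem map_range_congr {α : Type} (N : Nat) (f g : Nat → α) (h : ∀ i, i < N → f i = g i) :
    (List.range N).map f = (List.range N).map g :=
  List.map_congr_left (fun i hi => h i (List.mem_range.mp hi))

theorem set_map_range {α : Type} (f : Nat → α) (N i : Nat) (v : α) (h : i < N) :
    ((List.range N).map f).set i v = (List.range N).map (fun t => if t = i then v else f t) := by
  apply List.ext_getElem
  · simp
  · intro j h1 h2
    simp only [List.getElem_set, List.getElem_map, List.getElem_range]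
    simp only [List.length_set, List.length_map, List.length_range] at h1
    split_ifs with hij hji hji <;> first | rfl | omega

theorem rowIdx_eq (N i : Nat) :
    rowIdx N i = ((List.range N).filter (fun j => !(qN N i j))).map (fun j => i * N + j) := by
  simp [rowIdx, rowIdxFrom, List.range_eq_range']

theorem range_reverse_eq (N : Nat) :
    (List.range N).reverse = (List.range N).map (fun i => N - 1 - i) := by
  rw [List.range_eq_range', List.reverse_range', ← List.range_eq_range']
  simp

-- central symmetry of the else set: (flattened) reversal is the complement map
theorem sym_filter (N : Nat) (p : Nat → Bool) (hp : ∀ i < N, p (N - 1 - i) = p i) :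
    ((List.range N).filter p).reverse = ((List.range N).filter p).map (fun j => N - 1 - j) := by
  rw [← List.filter_reverse, range_reverse_eq, List.filter_map]
  congr 1
  apply List.filter_congr
  intro x hx
  exact hp x (List.mem_range.mp hx)

theorem sym_S (N : Nat) :
    ((List.range N).flatMap (rowIdx N)).reverse
      = ((List.range N).flatMap (rowIdx N)).map (fun t => N * N - 1 - t) := by
  rw [List.reverse_flatMap, range_reverse_eq, List.flatMap_map, List.map_flatMap]
  apply List.flatMap_congr
  intro i hi
  have hiN : i < N := List.mem_range.mp hi
  show (rowIdx N (N - 1 - i)).reverse = (rowIdx N i).map (fun t => N * N - 1 - t)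
  rw [rowIdx_eq, rowIdx_eq, ← List.map_reverse,
      sym_filter N (fun j => !(qN N (N - 1 - i) j)) (fun j hj => by simp only [Bool.not_inj_iff]; exact q_sym_right N _ j hj),
      List.map_map, List.map_map]
  have hfil : (List.range N).filter (fun j => !(qN N (N - 1 - i) j))
      = (List.range N).filter (fun j => !(qN N i j)) := by
    apply List.filter_congr
    intro j hj
    rw [q_sym_left N i j hiN]
  rw [hfil]
  apply List.map_congr_left
  intro j hj
  have hjN : j < N := List.mem_range.mp (List.mem_of_mem_filter hj)
  show (N - 1 - i) * N + (N - 1 - j) = N * N - 1 - (i * N + j)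
  have h1 : (N - 1 - i) * N = N * N - (i + 1) * N := by
    have : N - 1 - i = N - (i + 1) := by omega
    rw [this, Nat.sub_mul]
  have h2 : (i + 1) * N ≤ N * N := Nat.mul_le_mul_right N (by omega)
  have h3 : (i + 1) * N = i * N + N := by ring
  omega

theorem S_lt (N : Nat) (t : Nat) (ht : t ∈ (List.range N).flatMap (rowIdx N)) : t < N * N := by
  rw [List.mem_flatMap] at ht
  obtain ⟨i, hi, hti⟩ := ht
  rw [rowIdx_eq, List.mem_map] at hti
  obtain ⟨j, hj, rfl⟩ := hti
  have hiN : i < N := List.mem_range.mp hi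
  have hjN : j < N := List.mem_range.mp (List.mem_of_mem_filter hj)
  have h2 : (i + 1) * N ≤ N * N := Nat.mul_le_mul_right N (by omega)
  have h3 : (i + 1) * N = i * N + N := by ring
  omega

-- pass-1 board-update helpers
theorem bd1_getD (N i k : Nat) (hi : i < N) : (bd1 N i k).getD i [] = rowP1 N i k := by
  unfold bd1
  rw [PySem.List.getD_map_range _ N i _ hi]
  simp

theorem rowP1_zero (N i : Nat) : rowP1 N i 0 = List.replicate N 0 := by
  unfold rowP1
  simp

theorem rowP1_set (N i k : Nat) (hk : k < N) (hq : qN N i k = true) :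
    (rowP1 N i k).set k ((N : Int) * N - ((i * N : Nat) : Int) - (k : Int)) = rowP1 N i (k + 1) := by
  unfold rowP1
  rw [set_map_range _ N k _ hk]
  apply map_range_congr
  intro j hj
  by_cases hjk : j = k
  · subst hjk
    simp [cellA, hq]
    push_cast; ring
  · simp only [if_neg hjk]
    split_ifs <;> first | rfl | omega | simp_all

theorem rowP1_skip (N i k : Nat) (hq : qN N i k = false) : rowP1 N i (k + 1) = rowP1 N i k := by
  unfold rowP1
  apply map_range_congr
  intro j hj
  by_cases hjk : j = k
  · subst hjk
    simp [cellA, hq]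
  · split_ifs <;> first | rfl | omega | simp_all

theorem bd1_set (N i k : Nat) (hi : i < N) :
    (bd1 N i k).set i (rowP1 N i (k + 1)) = bd1 N i (k + 1) := by
  unfold bd1
  rw [set_map_range _ N i _ hi]
  apply map_range_congr
  intro t ht
  split_ifs <;> first | rfl | omega | simp_all

theorem bd1_zero (N k : Nat) : bd1 N k 0 = bdRows N k := by
  unfold bd1 bdRows
  apply map_range_congr
  intro t ht
  rw [rowP1_zero]
  split_ifs <;> first | rfl | omega | simp_all

theorem bd1_full (N k : Nat) (_hk : k < N) : bd1 N k N = bdRows N (k + 1) := by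
  unfold bd1 bdRows
  apply map_range_congr
  intro t ht
  have hrow : rowP1 N k N = rowA N k := by
    unfold rowP1 rowA
    apply map_range_congr
    intro j hj
    rw [if_pos hj]
  rw [hrow]
  split_ifs <;> first | rfl | omega | simp_all

-- pass 1
theorem inner1 (N i : Nat) (hi : i < N) (st : List Int) (k : Nat) (hk : k ≤ N) :
    (List.range k).foldl (step1 N i) (bd1 N i 0, (N : Int) * N - (i * N : Nat), st)
      = (bd1 N i k, (N : Int) * N - (i * N : Nat) - k, st ++ ((List.range k).filter (fun j => !(qN N i j))).map (fun j => (N : Int) * N - (i * N + j : Nat))) := by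
  induction k with
  | zero => simp
  | succ k ih =>
    have hkN : k < N := by omega
    rw [List.range_succ, List.foldl_append, ih (by omega)]
    simp only [List.foldl_cons, List.foldl_nil]
    unfold step1
    cases hq : qN N i k with
    | true =>
      rw [show (bandN N i != bandN N k) = qN N i k from rfl, hq]
      simp only [if_true, Prod.mk.injEq]
      refine ⟨?_, ?_, ?_⟩
      · show pvSet2 (bd1 N i k) i k ((N : Int) * N - ((i * N : Nat) : Int) - (k : Int)) = _
        unfold pvSet2
        rw [bd1_getD N i k hi, rowP1_set N i k hkN hq, bd1_set N i k hi]
      · push_cast; ring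
      · rw [List.filter_append]
        simp [hq]
    | false =>
      rw [show (bandN N i != bandN N k) = qN N i k from rfl, hq]
      simp only [Bool.false_eq_true, if_false, Prod.mk.injEq]
      refine ⟨?_, ?_, ?_⟩
      · show bd1 N i k = bd1 N i (k + 1)
        unfold bd1
        rw [rowP1_skip N i k hq]
      · push_cast; ring
      · rw [List.filter_append, List.map_append, ← List.append_assoc]
        simp only [List.filter_cons, List.filter_nil, hq, Bool.not_false, if_true, List.map_cons,
          List.map_nil, List.append_cancel_left_eq, List.cons.injEq, and_true]
        push_cast
        ring

theorem outer1 (N : Nat) (k : Nat) (hk : k ≤ N) :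
    (List.range k).foldl (fun s i => (List.range N).foldl (step1 N i) s)
        ((List.range N).map (fun _ => List.replicate N (0 : Int)), ((N : Int) * N, ([] : List Int)))
      = (bdRows N k, (N : Int) * N - (k * N : Nat),
         ((List.range k).flatMap (rowIdx N)).map (fun t : Nat => (N : Int) * N - (t : Int))) := by
  induction k with
  | zero =>
    simp only [List.range_zero, List.foldl_nil, List.flatMap_nil, List.map_nil]
    refine congrArg₂ Prod.mk ?_ (congrArg₂ Prod.mk ?_ rfl)
    · unfold bdRows
      apply map_range_congr
      intro t ht
      rw [if_neg (by omega)]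
    · simp
  | succ k ih =>
    have hkN : k < N := by omega
    rw [List.range_succ, List.foldl_append, ih (by omega)]
    simp only [List.foldl_cons, List.foldl_nil]
    have h0 : bdRows N k = bd1 N k 0 := (bd1_zero N k).symm
    rw [h0, inner1 N k hkN _ N (le_refl N)]
    refine congrArg₂ Prod.mk ?_ (congrArg₂ Prod.mk ?_ ?_)
    · exact bd1_full N k hkN
    · push_cast; ring
    · rw [List.flatMap_append, List.map_append]
      congr 1
      simp only [List.flatMap_cons, List.flatMap_nil, List.append_nil]
      rw [rowIdx_eq, List.map_map]
      rfl

-- the initial pass-2 stack, rewritten by central symmetry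
theorem stack_sym (N : Nat) :
    ((List.range N).flatMap (rowIdx N)).map (fun t : Nat => (N : Int) * N - (t : Int))
      = (((List.range N).flatMap (rowIdx N)).map (fun t : Nat => (t : Int) + 1)).reverse := by
  rw [← List.map_reverse, sym_S, List.map_map]
  apply List.map_congr_left
  intro t ht
  have htM : t < N * N := S_lt N t ht
  have hcast : ((N : Int) * N) = ((N * N : Nat) : Int) := by push_cast; ring
  show (N : Int) * N - (t : Int) = ((N * N - 1 - t : Nat) : Int) + 1
  rw [hcast]
  omega

-- pass-2 helpers
theorem cell_lt (N i k : Nat) (hi : i < N) (hk : k < N) : i * N + k < N * N := by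
  have h2 : (i + 1) * N ≤ N * N := Nat.mul_le_mul_right N (by omega)
  have h3 : (i + 1) * N = i * N + N := by ring
  omega

theorem bd2_getD (N i k : Nat) (hi : i < N) : (bd2 N i k).getD i [] = rowP2 N i k := by
  unfold bd2
  rw [PySem.List.getD_map_range _ N i _ hi]
  simp

theorem rowP2_getD (N i k : Nat) (hk : k < N) : (rowP2 N i k).getD k 0 = cellA N i k := by
  unfold rowP2
  rw [PySem.List.getD_map_range _ N k _ hk]
  simp

theorem rowP2_skip (N i k : Nat) (hq : qN N i k = true) : rowP2 N i (k + 1) = rowP2 N i k := by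
  unfold rowP2
  apply map_range_congr
  intro j hj
  by_cases hjk : j = k
  · subst hjk
    simp [cellA, cellF, hq]
  · split_ifs <;> first | rfl | omega | simp_all

theorem rowP2_set (N i k : Nat) (hk : k < N) (hq : qN N i k = false) :
    (rowP2 N i k).set k (((i * N + k : Nat) : Int) + 1) = rowP2 N i (k + 1) := by
  unfold rowP2
  rw [set_map_range _ N k _ hk]
  apply map_range_congr
  intro j hj
  by_cases hjk : j = k
  · subst hjk
    simp [cellF, hq]
  · simp only [if_neg hjk]
    split_ifs <;> first | rfl | omega | simp_all

theorem bd2_set (N i k : Nat) (hi : i < N) :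
    (bd2 N i k).set i (rowP2 N i (k + 1)) = bd2 N i (k + 1) := by
  unfold bd2
  rw [set_map_range _ N i _ hi]
  apply map_range_congr
  intro t ht
  split_ifs <;> first | rfl | omega | simp_all

theorem range'_cons (s n : Nat) (h : s < n) : List.range' s (n - s) = s :: List.range' (s + 1) (n - (s + 1)) := by
  have hn : n - s = (n - (s + 1)) + 1 := by omega
  rw [hn, List.range'_succ]

theorem rowIdxFrom_skip (N i k : Nat) (hk : k < N) (hq : qN N i k = true) :
    rowIdxFrom N i k = rowIdxFrom N i (k + 1) := by
  unfold rowIdxFrom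
  rw [range'_cons k N hk]
  simp [hq]

theorem rowIdxFrom_cons (N i k : Nat) (hk : k < N) (hq : qN N i k = false) :
    rowIdxFrom N i k = (i * N + k) :: rowIdxFrom N i (k + 1) := by
  unfold rowIdxFrom
  rw [range'_cons k N hk]
  simp [hq]

theorem stk_pop (N i k : Nat) (hk : k < N) (hq : qN N i k = false) :
    stk N i k = stk N i (k + 1) ++ [((i * N + k : Nat) : Int) + 1] := by
  unfold stk tailIdx
  rw [rowIdxFrom_cons N i k hk hq]
  simp

-- pass 2
theorem inner2 (N i : Nat) (hi : i < N) (k : Nat) (hk : k ≤ N) :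
    (List.range k).foldl (step2 N i) (bd2 N i 0, stk N i 0) = (bd2 N i k, stk N i k) := by
  induction k with
  | zero => simp
  | succ k ih =>
    have hkN : k < N := by omega
    rw [List.range_succ, List.foldl_append, ih (by omega)]
    simp only [List.foldl_cons, List.foldl_nil]
    unfold step2
    simp only [bd2_getD N i k hi, rowP2_getD N i k hkN]
    cases hq : qN N i k with
    | true =>
      have hne : cellA N i k ≠ 0 := by
        have hlt := cell_lt N i k hi hkN
        have hcast : ((N : Int) * N) = ((N * N : Nat) : Int) := by push_cast; ring
        simp only [cellA, hq, if_true, hcast]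
        omega
      rw [if_neg (by simpa using hne)]
      refine congrArg₂ Prod.mk ?_ ?_
      · show bd2 N i k = bd2 N i (k + 1)
        unfold bd2
        rw [rowP2_skip N i k hq]
      · show stk N i k = stk N i (k + 1)
        unfold stk tailIdx
        rw [rowIdxFrom_skip N i k hkN hq]
    | false =>
      have hz : cellA N i k = 0 := by simp [cellA, hq]
      rw [if_pos (by simp [hz])]
      rw [stk_pop N i k hkN hq]
      simp only [List.getLast?_concat, List.dropLast_concat, Option.getD_some]
      refine congrArg₂ Prod.mk ?_ rfl
      show pvSet2 (bd2 N i k) i k _ = bd2 N i (k + 1)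
      unfold pvSet2
      rw [bd2_getD N i k hi, rowP2_set N i k hkN hq, bd2_set N i k hi]

theorem rowP2_zero (N i : Nat) : rowP2 N i 0 = rowA N i := by
  unfold rowP2 rowA
  apply map_range_congr
  intro j hj
  rw [if_neg (by omega)]

theorem rowP2_full (N i : Nat) : rowP2 N i N = rowF N i := by
  unfold rowP2 rowF
  apply map_range_congr
  intro j hj
  rw [if_pos hj]

theorem bd2_zero (N k : Nat) : bd2 N k 0 = bdF N k := by
  unfold bd2 bdF
  apply map_range_congr
  intro t ht
  rw [rowP2_zero]
  split_ifs <;> first | rfl | omega | simp_all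

theorem bd2_full (N k : Nat) : bd2 N k N = bdF N (k + 1) := by
  unfold bd2 bdF
  apply map_range_congr
  intro t ht
  rw [rowP2_full]
  split_ifs <;> first | rfl | omega | simp_all

theorem stk_row_start (N k : Nat) (hk : k < N) :
    stk N k 0 = (((List.range' k (N - k)).flatMap (rowIdx N)).map (fun t : Nat => (t : Int) + 1)).reverse := by
  unfold stk tailIdx
  rw [range'_cons k N hk]
  simp [rowIdx]

theorem stk_row_end (N k : Nat) :
    stk N k N = (((List.range' (k + 1) (N - (k + 1))).flatMap (rowIdx N)).map (fun t : Nat => (t : Int) + 1)).reverse := by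
  unfold stk tailIdx
  have h : rowIdxFrom N k N = [] := by
    unfold rowIdxFrom
    simp
  rw [h]
  simp

theorem outer2 (N : Nat) (k : Nat) (hk : k ≤ N) :
    (List.range k).foldl (fun s i => (List.range N).foldl (step2 N i) s)
        (bdF N 0, (((List.range' 0 (N - 0)).flatMap (rowIdx N)).map (fun t : Nat => (t : Int) + 1)).reverse)
      = (bdF N k, (((List.range' k (N - k)).flatMap (rowIdx N)).map (fun t : Nat => (t : Int) + 1)).reverse) := by
  induction k with
  | zero => simp
  | succ k ih =>
    have hkN : k < N := by omega
    rw [List.range_succ, List.foldl_append, ih (by omega)]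
    simp only [List.foldl_cons, List.foldl_nil]
    rw [← stk_row_start N k hkN, ← bd2_zero N k, inner2 N k hkN N (le_refl N),
        bd2_full N k, stk_row_end N k]

theorem pyRange_cast (N : Nat) : PySem.List.pyRange 0 (N : Int) 1 = (List.range N).map (fun k : Nat => (k : Int)) := by
  rw [PySem.List.pyRange_one]
  simp

theorem alt_eq (N : Nat) : four_even_alt (N : Int) = (List.range N).map (rowF N) := by
  simp only [four_even_alt, pyRange_cast, List.map_map]
  apply map_range_congr
  intro i hi
  simp only [Function.comp_def, band_cast]
  unfold rowF
  apply map_range_congr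
  intro j hj
  show (if (bandN N i != bandN N j) = true then (N : Int) * N - ((i : Int) * N + j) else (i : Int) * N + j + 1) = cellF N i j
  unfold cellF qN
  split_ifs <;> (push_cast; ring)

theorem main_nat (N : Nat) : four_even (N : Int) = four_even_alt (N : Int) := by
  rw [alt_eq]
  simp only [four_even, pyRange_cast, List.foldl_map, List.map_map, band_cast, Int.toNat_natCast]
  show ((List.range N).foldl (fun s i => (List.range N).foldl (step2 N i) s)
      (((List.range N).foldl (fun s i => (List.range N).foldl (step1 N i) s)
        ((List.range N).map (fun _ => List.replicate N (0 : Int)), ((N : Int) * N, ([] : List Int)))).1,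
       ((List.range N).foldl (fun s i => (List.range N).foldl (step1 N i) s)
        ((List.range N).map (fun _ => List.replicate N (0 : Int)), ((N : Int) * N, ([] : List Int)))).2.2)).1
    = (List.range N).map (rowF N)
  rw [outer1 N N (le_refl N)]
  have hb0 : bdRows N N = bdF N 0 := by
    unfold bdRows bdF
    apply map_range_congr
    intro t ht
    split_ifs <;> first | rfl | omega
  have hs0 : ((List.range N).flatMap (rowIdx N)).map (fun t : Nat => (N : Int) * N - (t : Int))
      = (((List.range' 0 (N - 0)).flatMap (rowIdx N)).map (fun t : Nat => (t : Int) + 1)).reverse := by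
    rw [stack_sym N]
    have : List.range' 0 (N - 0) = List.range N := by
      rw [Nat.sub_zero, ← List.range_eq_range']
    rw [this]
  show ((List.range N).foldl (fun s i => (List.range N).foldl (step2 N i) s)
      (bdRows N N, ((List.range N).flatMap (rowIdx N)).map (fun t : Nat => (N : Int) * N - (t : Int)))).1
    = (List.range N).map (rowF N)
  rw [hb0, hs0, outer2 N N (le_refl N)]
  show bdF N N = (List.range N).map (rowF N)
  unfold bdF
  apply map_range_congr
  intro t ht
  rw [if_pos ht]

-- ===== VERDICT (by name: the statement is the Claim_ definition above) =====
theorem four_even_spec : Claim_equal_four_even := by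
  intro n _
  unfold Spec_four_even
  rcases (show 0 ≤ n ∨ n < 0 by omega) with h | h
  · obtain ⟨N, rfl⟩ := Int.eq_ofNat_of_zero_le h
    exact (main_nat N)
  · have hnil : PySem.List.pyRange 0 n 1 = [] := PySem.List.pyRange_one_eq_nil (by omega)
    simp [four_even, four_even_alt, hnil]
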